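-- pv_equiv track=rewrite | github.com/Aasthaengg/IBMdataset | Python_codes/p03565/s530990512.py | solve
-- ===== SOURCE A (Python) =====
-- def solve(s,t):
--   s_len = len(s)
--   t_len = len(t)
--   k = 0
--   l = []
--   while k + t_len <= s_len:
--     flag = True
--     for i in range(t_len):
--       if s[k+i] == t[i] or s[k+i] == "?":
--         pass
--       else:
--         flag = False
--     cand = "".join((s[:k],t,s[k+t_len:])).replace("?","a")
--     if flag:
--       l.append(cand)
--     k += 1
--   if len(l) == 0:
--     return "UNRESTORABLE"
--   else:
--     return list(sorted(l))[0]
-- ===== SOURCE B (Python) =====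
-- def solve(s, t):
--     n, m = len(s), len(t)
--     base = s.replace("?", "a")
--     u = t.replace("?", "a")
--     best = None
--     for k in range(n - m + 1):
--         if all(s[k + i] == t[i] or s[k + i] == "?" for i in range(m)):
--             if best is None:
--                 best = k
--             elif base[best:k] + u < u + base[best + m:k + m]:
--                 # candidate at k beats candidate at best: they share the prefix
--                 # base[:best] and the suffix base[k+m:], so comparing the middles
--                 # (each of length k-best+m) decides the full comparison.
--                 best = k
--     if best is None:
--         return "UNRESTORABLE"
--     return base[:best] + u + base[best + m:]
-- ===== Notes on version B (the rewrite author's own statement) =====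
-- stated objective: alternative
-- what changed: A builds a full candidate string at every window position, collects the matching ones, sorts the whole list and takes its head; B never materialises candidates: it precomputes base = s.replace('?','a') once, keeps only the best POSITION, and decides cand(k) < cand(best) by comparing just the middle windows base[best:k]+u vs u+base[best+m:k+m] (the candidates provably share the prefix base[:best] and the suffix base[k+m:]), building the single output string at the end.
import Mathlib
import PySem

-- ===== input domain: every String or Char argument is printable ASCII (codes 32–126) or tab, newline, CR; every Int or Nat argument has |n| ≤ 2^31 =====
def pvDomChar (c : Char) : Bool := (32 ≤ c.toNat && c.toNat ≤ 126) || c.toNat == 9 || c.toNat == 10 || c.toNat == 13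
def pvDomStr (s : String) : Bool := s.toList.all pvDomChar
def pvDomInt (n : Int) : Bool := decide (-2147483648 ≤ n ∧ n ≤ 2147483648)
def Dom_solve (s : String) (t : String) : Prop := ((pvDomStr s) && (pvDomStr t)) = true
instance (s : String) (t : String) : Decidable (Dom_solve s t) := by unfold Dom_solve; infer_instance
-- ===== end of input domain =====

-- B replaces A's build-every-candidate / sort / take-first pipeline by an argmin over POSITIONS:
-- it precomputes base = s with '?'→'a' once, and compares two placements by comparing only the
-- windows where the candidates can differ (they share the prefix before the earlier placement
-- and the suffix after the later window), building the single output string once at the end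
-- (objective: alternative; A does not mutate its arguments).

-- ===== PORT A =====
-- A's while loop: k counts up while k + len(t) <= len(s); l accumulates every candidate whose
-- position matches (inner for loop has no break — it always scans all of t).
def solveLoopA (s t : List Char) (k : Nat) (l : List (List Char)) : List (List Char) :=
  if k + t.length ≤ s.length then
    let flag := (PySem.List.pyRange 0 (t.length : Int) 1).foldl
      (fun flag i =>
        if PySem.List.pyGetD s ((k : Int) + i) ' ' == PySem.List.pyGetD t i ' '
           || PySem.List.pyGetD s ((k : Int) + i) ' ' == '?'
        then flag else false) true
    -- "".join((s[:k], t, s[k+t_len:])) is concatenation of the three pieces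
    let cand := PySem.Chars.replace
      (PySem.List.slice s none (some (k : Int)) ++ t
        ++ PySem.List.slice s (some ((k : Int) + (t.length : Int))) none) ['?'] ['a']
    solveLoopA s t (k + 1) (if flag then l ++ [cand] else l)
  else l
termination_by s.length + 1 - k
decreasing_by omega

def solve (s : String) (t : String) : String :=
  let l := solveLoopA s.toList t.toList 0 []
  if l.length = 0 then "UNRESTORABLE"
  else String.ofList (PySem.List.pyGetD (PySem.List.sorted l (fun x => x) false) 0 [])

-- ===== PORT B =====
-- Source B: base = s.replace("?","a"); u = t.replace("?","a"); scan k, keep the best POSITION,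
-- deciding cand(k) < cand(best) by comparing base[best:k]+u with u+base[best+m:k+m];
-- build the output string only once at the end.
def solve_alt (s : String) (t : String) : String :=
  let sl := s.toList
  let tl := t.toList
  let base := PySem.Chars.replace sl ['?'] ['a']
  let u := PySem.Chars.replace tl ['?'] ['a']
  let m : Int := (tl.length : Int)
  let best := (PySem.List.pyRange 0 ((sl.length : Int) - m + 1) 1).foldl
    (fun best k =>
      if (PySem.List.pyRange 0 m 1).all (fun i =>
            PySem.List.pyGetD sl (k + i) ' ' == PySem.List.pyGetD tl i ' '
            || PySem.List.pyGetD sl (k + i) ' ' == '?') then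
        match best with
        | none => some k
        | some b =>
          if PySem.List.slice base (some b) (some k) ++ u
             < u ++ PySem.List.slice base (some (b + m)) (some (k + m))
          then some k else some b
      else best) none
  match best with
  | none => "UNRESTORABLE"
  | some b => String.ofList (PySem.List.slice base none (some b) ++ u
      ++ PySem.List.slice base (some (b + m)) none)

-- ===== PRECONDITION & SPEC =====
def Spec_solve (s : String) (t : String) (out : String) : Prop := out = solve_alt s t
instance (s : String) (t : String) (out : String) : Decidable (Spec_solve s t out) := by unfold Spec_solve; infer_instance

-- ===== CLAIM (what is proved, stated in full; the proofs are below) =====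
def Claim_equal_solve : Prop := ∀ (s : String) (t : String), Dom_solve s t → Spec_solve s t (solve s t)

-- ===== LEMMAS AND PROOFS =====

-- '?'→'a' on one character; replace with a single-char pattern is a map
def repC (c : Char) : Char := if c == '?' then 'a' else c

theorem replace_go_single (fuel : Nat) (l acc : List Char) (h : l.length ≤ fuel) :
    PySem.Chars.replace.go ['?'] ['a'] fuel l acc = acc.reverse ++ l.map repC := by
  induction fuel generalizing l acc with
  | zero =>
    have : l = [] := List.length_eq_zero_iff.mp (Nat.le_zero.mp h)
    subst this
    simp [PySem.Chars.replace.go]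
  | succ fuel ih =>
    cases l with
    | nil => simp [PySem.Chars.replace.go]
    | cons c t =>
      simp only [PySem.Chars.replace.go, List.isPrefixOf, Bool.and_true]
      by_cases hc : c = '?'
      · subst hc
        simp only [beq_self_eq_true, if_pos]
        rw [ih _ _ (by simpa using Nat.le_of_succ_le_succ h)]
        simp [repC]
      · rw [if_neg (by simp [beq_iff_eq]; exact fun h' => hc h'.symm)]
        rw [ih _ _ (by simpa using Nat.le_of_succ_le_succ h)]
        simp [repC, hc]

theorem replace_eq_map (l : List Char) :
    PySem.Chars.replace l ['?'] ['a'] = l.map repC := by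
  rw [PySem.Chars.replace]
  simp only [List.isEmpty_cons, if_false, Bool.false_eq_true]
  exact replace_go_single l.length l [] le_rfl

-- spec-side normal forms: "position k matches" and "candidate at k"
def validN (s t : List Char) (k : Nat) : Bool :=
  (List.range t.length).all
    (fun i => s.getD (k + i) ' ' == t.getD i ' ' || s.getD (k + i) ' ' == '?')

def candN (s t : List Char) (k : Nat) : List Char :=
  (s.map repC).take k ++ t.map repC ++ (s.map repC).drop (k + t.length)

def candList (s t : List Char) : List (List Char) :=
  ((List.range (s.length + 1 - t.length)).filter (validN s t)).map (candN s t)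

theorem foldl_and_eq_all {α : Type} (p : α → Bool) (l : List α) (b : Bool) :
    l.foldl (fun f i => if p i then f else false) b = (b && l.all p) := by
  induction l generalizing b with
  | nil => simp
  | cons x xs ih =>
    rw [List.foldl_cons, ih]
    cases h : p x <;> cases b <;> simp [h]

theorem candA_eq (s t : List Char) (k : Nat) :
    PySem.Chars.replace
      (PySem.List.slice s none (some (k : Int)) ++ t
        ++ PySem.List.slice s (some ((k : Int) + (t.length : Int))) none) ['?'] ['a']
      = candN s t k := by
  have h : ((k : Int) + (t.length : Int)) = ((k + t.length : Nat) : Int) := by push_cast; ring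
  rw [h, PySem.List.slice_to_natCast, PySem.List.slice_from_natCast, replace_eq_map, candN]
  simp [List.map_take, List.map_drop]

theorem flagA_eq (s t : List Char) (k : Nat) :
    (PySem.List.pyRange 0 (t.length : Int) 1).foldl
      (fun flag i =>
        if PySem.List.pyGetD s ((k : Int) + i) ' ' == PySem.List.pyGetD t i ' '
           || PySem.List.pyGetD s ((k : Int) + i) ' ' == '?'
        then flag else false) true = validN s t k := by
  rw [PySem.List.pyRange_zero_natCast, List.foldl_map, foldl_and_eq_all, Bool.true_and, validN]
  refine List.all_congr rfl (fun i => ?_)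
  have h : ((k : Int) + (i : Int)) = ((k + i : Nat) : Int) := by push_cast; ring
  rw [h, PySem.List.pyGetD_natCast, PySem.List.pyGetD_natCast]

theorem solveLoopA_eq (s t : List Char) (k : Nat) (l : List (List Char)) :
    solveLoopA s t k l =
      l ++ ((List.range' k (s.length + 1 - t.length - k)).filter (validN s t)).map (candN s t) := by
  fun_induction solveLoopA s t k l with
  | case1 k l h flag cand ih =>
    have hn : s.length + 1 - t.length - k = (s.length + 1 - t.length - (k + 1)) + 1 := by omega
    have hf : flag = validN s t k := flagA_eq s t k
    have hc : cand = candN s t k := candA_eq s t k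
    simp only [dite_eq_ite] at ih
    rw [ih, hn, List.range'_succ, hf, hc]
    by_cases hv : validN s t k = true <;> simp [hv]
  | case2 k l h =>
    have : s.length + 1 - t.length - k = 0 := by omega
    simp [this]

theorem solveLoopA_zero (s t : List Char) :
    solveLoopA s t 0 [] = candList s t := by
  rw [solveLoopA_eq, candList, List.range_eq_range']
  simp

-- head of Python's stable sort = the minimum value (over a linear order)
theorem head_sorted_min {κ : Type} [LinearOrder κ] (x : κ) (xs : List κ) (d : κ) :
    PySem.List.pyGetD (PySem.List.sorted (x :: xs) (fun y => y) false) 0 d = xs.foldl min x := by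
  have hperm : (PySem.List.sorted (x :: xs) (fun y : κ => y) false).Perm (x :: xs) :=
    PySem.List.sorted_perm _ _ _
  have hpair := PySem.List.sorted_pairwise (x :: xs) (fun y : κ => y)
  obtain ⟨h, rest, hcons⟩ : ∃ h rest,
      PySem.List.sorted (x :: xs) (fun y : κ => y) false = h :: rest := by
    cases hsrt : PySem.List.sorted (x :: xs) (fun y : κ => y) false with
    | nil =>
      exfalso
      have := hperm.length_eq
      rw [hsrt] at this
      simp at this
    | cons a b => exact ⟨a, b, rfl⟩
  rw [hcons] at hperm hpair ⊢
  have hmem : h ∈ x :: xs := hperm.mem_iff.mp List.mem_cons_self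
  have hle : ∀ y ∈ x :: xs, h ≤ y := by
    intro y hy
    rcases List.mem_cons.mp (hperm.mem_iff.mpr hy) with rfl | hy''
    · exact le_refl y
    · exact (List.pairwise_cons.mp hpair).1 y hy''
  have hmin : PySem.List.min? (x :: xs) (fun y : κ => y) = some (xs.foldl min x) :=
    PySem.List.min?_id_cons x xs
  have hm_mem : xs.foldl min x ∈ x :: xs := PySem.List.min?_mem hmin
  have hm_le : ∀ y ∈ x :: xs, xs.foldl min x ≤ y := PySem.List.min?_isMin hmin
  have hhm : h = xs.foldl min x := le_antisymm (hle _ hm_mem) (hm_le _ hmem)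
  rw [PySem.List.pyGetD_zero]
  simpa using hhm

theorem sorted_head_eq_min (x : List Char) (xs : List (List Char)) :
    PySem.List.pyGetD (PySem.List.sorted (x :: xs) (fun y => y) false) 0 [] =
      xs.foldl min x := by
  convert head_sorted_min x xs ([] : List Char) using 2; congr 1

-- ===== lex-order lemmas for the window comparison =====

theorem append_lt_append_left (P x y : List Char) : P ++ x < P ++ y ↔ x < y := by
  induction P with
  | nil => rfl
  | cons c P ih => simpa [List.cons_lt_cons_iff] using ih

theorem append_lt_append_right (x y S : List Char) (h : x.length = y.length) :
    x ++ S < y ++ S ↔ x < y := by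
  induction x generalizing y with
  | nil =>
    have : y = [] := List.length_eq_zero_iff.mp h.symm
    subst this
    simp
  | cons a x ih =>
    cases y with
    | nil => simp at h
    | cons b y =>
      simp only [List.cons_append, List.cons_lt_cons_iff]
      rw [ih y (by simpa using h)]

-- matching in B equals validN
theorem matchB_eq (s t : List Char) (k : Nat) :
    (PySem.List.pyRange 0 (t.length : Int) 1).all (fun i =>
        PySem.List.pyGetD s ((k : Int) + i) ' ' == PySem.List.pyGetD t i ' '
        || PySem.List.pyGetD s ((k : Int) + i) ' ' == '?') = validN s t k := by
  rw [PySem.List.pyRange_zero_natCast, List.all_map, validN]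
  refine List.all_congr rfl (fun i => ?_)
  have h : ((k : Int) + (i : Int)) = ((k + i : Nat) : Int) := by push_cast; ring
  simp only [Function.comp, h, PySem.List.pyGetD_natCast]

-- the window comparison decides the full candidate comparison
theorem middle_lt (s t : List Char) (p k : Nat) (hpk : p ≤ k) (hk : k + t.length ≤ s.length) :
    (((s.map repC).drop p).take (k - p) ++ t.map repC
       < t.map repC ++ ((s.map repC).drop (p + t.length)).take (k - p))
      ↔ candN s t k < candN s t p := by
  set base := s.map repC with hbase
  set u := t.map repC with hu
  have hblen : base.length = s.length := by simp [hbase]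
  have hulen : u.length = t.length := by simp [hu]
  set M2 := (base.drop p).take (k - p) with hM2
  set M1 := (base.drop (p + t.length)).take (k - p) with hM1
  have htakek : base.take k = base.take p ++ M2 := by
    rw [hM2, ← List.take_add]
    congr 1
    omega
  have hdropp : base.drop (p + t.length) = M1 ++ base.drop (k + t.length) := by
    rw [hM1]
    conv_lhs => rw [← List.take_append_drop (k - p) (base.drop (p + t.length))]
    congr 1
    rw [List.drop_drop]
    congr 1
    omega
  have hlM2 : M2.length = k - p := by
    rw [hM2]
    simp [hblen]
    omega
  have hlM1 : M1.length = k - p := by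
    rw [hM1]
    simp [hblen]
    omega
  have hck : candN s t k = base.take p ++ (M2 ++ u) ++ base.drop (k + t.length) := by
    rw [candN, ← hbase, ← hu, htakek]
    simp [List.append_assoc]
  have hcp : candN s t p = base.take p ++ (u ++ M1) ++ base.drop (k + t.length) := by
    rw [candN, ← hbase, ← hu, hdropp]
    simp [List.append_assoc]
  rw [hck, hcp,
      show base.take p ++ (M2 ++ u) ++ base.drop (k + t.length)
          = base.take p ++ ((M2 ++ u) ++ base.drop (k + t.length)) from List.append_assoc _ _ _,
      show base.take p ++ (u ++ M1) ++ base.drop (k + t.length)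
          = base.take p ++ ((u ++ M1) ++ base.drop (k + t.length)) from List.append_assoc _ _ _,
      append_lt_append_left,
      append_lt_append_right (M2 ++ u) (u ++ M1) _ (by simp [hlM1, hlM2, hulen]; omega)]

-- B's running-best step, in Nat normal form
def stepPos (s t : List Char) (best : Option Nat) (k : Nat) : Option Nat :=
  match best with
  | none => some k
  | some b =>
    if ((s.map repC).drop b).take (k - b) ++ t.map repC
         < t.map repC ++ ((s.map repC).drop (b + t.length)).take (k - b)
    then some k else some b

-- generic: a fold whose Int state is the cast of a Nat state
theorem foldl_map_state {α β γ : Type} (c : β → γ) (F : Option γ → α → Option γ)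
    (G : Option β → α → Option β)
    (h : ∀ o a, F (Option.map c o) a = Option.map c (G o a)) (l : List α) (o : Option β) :
    l.foldl F (Option.map c o) = Option.map c (l.foldl G o) := by
  induction l generalizing o with
  | nil => rfl
  | cons x xs ih => rw [List.foldl_cons, List.foldl_cons, h, ih]

-- the positional running best computes the running minimum of the candidates
theorem foldPos_min (s t : List Char) (l : List Nat) (p : Nat)
    (hp : p + t.length ≤ s.length)
    (hlt : ∀ j ∈ l, p < j) (hbd : ∀ j ∈ l, j + t.length ≤ s.length)
    (hsort : l.Pairwise (· < ·)) :
    ∃ q, l.foldl (stepPos s t) (some p) = some q ∧ q + t.length ≤ s.length ∧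
      candN s t q = (l.map (candN s t)).foldl min (candN s t p) := by
  induction l generalizing p with
  | nil => exact ⟨p, rfl, hp, rfl⟩
  | cons k l ih =>
    have hpk : p < k := hlt k List.mem_cons_self
    have hkbd : k + t.length ≤ s.length := hbd k List.mem_cons_self
    have hcond : (((s.map repC).drop p).take (k - p) ++ t.map repC
        < t.map repC ++ ((s.map repC).drop (p + t.length)).take (k - p))
        ↔ candN s t k < candN s t p := middle_lt s t p k (le_of_lt hpk) hkbd
    rw [List.foldl_cons, List.map_cons, List.foldl_cons]
    by_cases hlt' : candN s t k < candN s t p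
    · rw [stepPos, if_pos (hcond.mpr hlt'), min_eq_right (le_of_lt hlt')]
      exact ih k hkbd (fun j hj => (List.pairwise_cons.mp hsort).1 j hj)
        (fun j hj => hbd j (List.mem_cons_of_mem _ hj)) (List.pairwise_cons.mp hsort).2
    · rw [stepPos, if_neg (fun hc => hlt' (hcond.mp hc)),
        min_eq_left (not_lt.mp hlt')]
      exact ih p hp (fun j hj => lt_trans hpk ((List.pairwise_cons.mp hsort).1 j hj))
        (fun j hj => hbd j (List.mem_cons_of_mem _ hj)) (List.pairwise_cons.mp hsort).2

-- B's fold over the Int range, reduced to stepPos over the filtered Nat range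
theorem solve_alt_fold_eq (s t : List Char) :
    (PySem.List.pyRange 0 ((s.length : Int) - (t.length : Int) + 1) 1).foldl
      (fun best k =>
        if (PySem.List.pyRange 0 (t.length : Int) 1).all (fun i =>
              PySem.List.pyGetD s (k + i) ' ' == PySem.List.pyGetD t i ' '
              || PySem.List.pyGetD s (k + i) ' ' == '?') then
          match best with
          | none => some k
          | some b =>
            if PySem.List.slice (PySem.Chars.replace s ['?'] ['a']) (some b) (some k)
                 ++ PySem.Chars.replace t ['?'] ['a']
               < PySem.Chars.replace t ['?'] ['a']
                 ++ PySem.List.slice (PySem.Chars.replace s ['?'] ['a'])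
                     (some (b + (t.length : Int))) (some (k + (t.length : Int)))
            then some k else some b
        else best) none
    = Option.map (fun q : Nat => (q : Int))
        (((List.range (s.length + 1 - t.length)).filter (validN s t)).foldl
          (stepPos s t) none) := by
  by_cases hle : t.length ≤ s.length
  · have hN : ((s.length : Int) - (t.length : Int) + 1)
        = ((s.length + 1 - t.length : Nat) : Int) := by omega
    rw [hN, PySem.List.pyRange_zero_natCast (s.length + 1 - t.length), List.foldl_map,
      List.foldl_filter]
    exact foldl_map_state (fun q : Nat => (q : Int)) _
      (fun best k => if validN s t k then stepPos s t best k else best)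
      (fun o k => by
        dsimp only
        rw [matchB_eq]
        by_cases hv : validN s t k = true
        · rw [if_pos hv, if_pos hv]
          cases o with
          | none => rfl
          | some b =>
            simp only [Option.map_some, stepPos]
            have hbk : ((b : Int) + (t.length : Int)) = ((b + t.length : Nat) : Int) := by
              push_cast; ring
            have hkk : ((k : Int) + (t.length : Int)) = ((k + t.length : Nat) : Int) := by
              push_cast; ring
            rw [replace_eq_map, replace_eq_map, PySem.List.slice_natCast, hbk, hkk,
              PySem.List.slice_natCast]
            have hsub : (k + t.length) - (b + t.length) = k - b := by omega
            rw [hsub]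
            split_ifs <;> rfl
        · rw [if_neg hv, if_neg hv]) _ none
  · have hneg : ((s.length : Int) - (t.length : Int) + 1) ≤ 0 := by omega
    have hr : PySem.List.pyRange 0 ((s.length : Int) - (t.length : Int) + 1) 1 = [] :=
      PySem.List.pyRange_one_eq_nil hneg
    have hc : (List.range (s.length + 1 - t.length)) = [] := by
      have : s.length + 1 - t.length = 0 := by omega
      simp [this]
    rw [hr, hc]
    rfl

-- filtered ranges are strictly increasing and bounded
theorem filter_range_sorted (s t : List Char) :
    (((List.range (s.length + 1 - t.length)).filter (validN s t)).Pairwise (· < ·)) :=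
  (List.pairwise_lt_range).filter _

theorem filter_range_bd (s t : List Char) (j : Nat)
    (hj : j ∈ (List.range (s.length + 1 - t.length)).filter (validN s t)) :
    j + t.length ≤ s.length := by
  have := List.mem_range.mp (List.mem_of_mem_filter hj)
  omega

-- final assembly of B's output at position q
theorem candB_out (s t : List Char) (q : Nat) :
    PySem.List.slice (PySem.Chars.replace s ['?'] ['a']) none (some (q : Int))
      ++ PySem.Chars.replace t ['?'] ['a']
      ++ PySem.List.slice (PySem.Chars.replace s ['?'] ['a'])
          (some ((q : Int) + (t.length : Int))) none
    = candN s t q := by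
  have h : ((q : Int) + (t.length : Int)) = ((q + t.length : Nat) : Int) := by push_cast; ring
  rw [replace_eq_map, replace_eq_map, h, PySem.List.slice_to_natCast,
    PySem.List.slice_from_natCast, candN]

-- ===== VERDICT (by name: the statement is the Claim_ definition above) =====
theorem solve_spec : Claim_equal_solve := by
  intro s t _
  unfold Spec_solve
  rw [solve, solve_alt]
  rw [solveLoopA_zero, solve_alt_fold_eq]
  cases hks : (List.range (s.toList.length + 1 - t.toList.length)).filter
      (validN s.toList t.toList) with
  | nil =>
    rw [candList, hks]
    simp
  | cons k0 rest =>
    have hsort := filter_range_sorted s.toList t.toList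
    rw [hks] at hsort
    have hbd : ∀ j ∈ k0 :: rest, j + t.toList.length ≤ s.toList.length := by
      intro j hj
      exact filter_range_bd s.toList t.toList j (hks ▸ hj)
    obtain ⟨q, hq, hqbd, hqmin⟩ := foldPos_min s.toList t.toList rest k0
      (hbd k0 List.mem_cons_self)
      (fun j hj => (List.pairwise_cons.mp hsort).1 j hj)
      (fun j hj => hbd j (List.mem_cons_of_mem _ hj))
      (List.pairwise_cons.mp hsort).2
    rw [List.foldl_cons, stepPos, hq]
    rw [candList, hks, List.map_cons]
    simp only [List.length_cons, Option.map_some]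
    rw [if_neg (by omega)]
    rw [sorted_head_eq_min, candB_out, hqmin]
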